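-- pv_equiv track=rewrite | github.com/Cbaharav/fair_manipulation-robust_transparent_sortition | scripts/paper_data_analysis.py | fv_vecs
-- ===== SOURCE A (Python) =====
-- def fv_vecs(people, entitlements, contributes_to_entitlement):
--     # fix an ordering of the features
--     feat_list = list(people[entitlements[0]].keys())
--     fv_vec_to_agents = {}
--     for id in people:
--         fv_vec = []
--         for feat in feat_list:
--             fv_vec.append(people[id][feat])
--         fv_vec = tuple(fv_vec)
--         if fv_vec not in fv_vec_to_agents:
--             fv_vec_to_agents[fv_vec] = [contributes_to_entitlement[id]]
--         else:
--             fv_vec_to_agents[fv_vec].append(contributes_to_entitlement[id])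
--     return fv_vec_to_agents
-- ===== SOURCE B (Python) =====
-- def fv_vecs(people, entitlements, contributes_to_entitlement):
--     # fix an ordering of the features
--     feat_list = list(people[entitlements[0]].keys())
--
--     def fv(i):
--         return tuple(people[i][feat] for feat in feat_list)
--
--     # repeatedly peel off the entire group of the first remaining agent
--     out = {}
--     ids = list(people)
--     while ids:
--         k = fv(ids[0])
--         out[k] = [contributes_to_entitlement[i] for i in ids if fv(i) == k]
--         ids = [i for i in ids if fv(i) != k]
--     return out
-- ===== Notes on version B (the rewrite author's own statement) =====
-- stated objective: alternative
-- what changed: B replaces A's single pass that grows a dict of lists by a group-extraction loop: while agents remain, it takes the first one's feature vector, collects the whole group of matching agents in one scan, and removes them from the worklist.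
import Mathlib
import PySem

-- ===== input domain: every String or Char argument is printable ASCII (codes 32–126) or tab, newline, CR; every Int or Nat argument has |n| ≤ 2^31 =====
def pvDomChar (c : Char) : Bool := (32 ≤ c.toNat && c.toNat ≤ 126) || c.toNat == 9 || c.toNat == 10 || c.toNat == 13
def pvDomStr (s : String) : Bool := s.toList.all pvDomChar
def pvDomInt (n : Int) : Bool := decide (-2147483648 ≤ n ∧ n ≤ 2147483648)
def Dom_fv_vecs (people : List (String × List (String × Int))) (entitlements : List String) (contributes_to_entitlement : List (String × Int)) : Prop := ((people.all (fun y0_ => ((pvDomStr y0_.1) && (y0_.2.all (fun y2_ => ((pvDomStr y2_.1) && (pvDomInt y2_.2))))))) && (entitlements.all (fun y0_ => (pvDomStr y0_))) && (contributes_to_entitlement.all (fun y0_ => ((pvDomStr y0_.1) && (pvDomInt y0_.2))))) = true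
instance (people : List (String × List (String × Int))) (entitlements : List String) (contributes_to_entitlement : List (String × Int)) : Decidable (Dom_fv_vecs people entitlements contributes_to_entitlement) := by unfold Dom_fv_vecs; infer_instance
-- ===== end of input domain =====

-- B groups the contributions by a group-extraction loop (peel off the whole group of the first
-- remaining agent, then recurse on the rest) instead of A's incremental dict of lists;
-- equal return value (same key order, same group order) on all inputs where A returns.

-- ===== PORT A =====
def fv_vecs (people : List (String × List (String × Int))) (entitlements : List String) (contributes_to_entitlement : List (String × Int)) : List (List Int × List Int) :=
  let pd := PySem.Dict.ofList people
  let cd := PySem.Dict.ofList contributes_to_entitlement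
  let e0 := (PySem.List.pyGet? entitlements 0).getD ""
  -- feat_list = list(people[entitlements[0]].keys())
  let feat_list := (PySem.Dict.mk (pd.getD e0 [])).keys
  let d := pd.keys.foldl (fun d id =>
    -- fv_vec = []; for feat in feat_list: fv_vec.append(people[id][feat])
    let fv := feat_list.foldl (fun acc feat => acc ++ [(PySem.Dict.mk (pd.getD id [])).getD feat 0]) []
    if d.contains fv then
      d.modify fv [] (· ++ [cd.getD id 0])        -- fv_vec_to_agents[fv].append(...)
    else
      d.insert fv [cd.getD id 0]) PySem.Dict.empty
  d.items

-- ===== PORT B =====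
-- the 'while ids:' group-extraction loop of Source B, as a recursion on the shrinking worklist
def pvGo (fvOf : String → List Int) (c : String → Int) : List String → List (List Int × List Int)
  | [] => []
  | id :: rest =>
    let k := fvOf id
    -- out[k] = [contributes_to_entitlement[i] for i in ids if fv(i) == k]
    (k, ((id :: rest).filter (fun i => fvOf i == k)).map c) ::
      -- ids = [i for i in ids if fv(i) != k]
      pvGo fvOf c (rest.filter (fun i => !(fvOf i == k)))
termination_by ids => ids.length
decreasing_by
  simp only [List.length_cons, List.length_unattach, Nat.lt_succ_iff]
  exact le_trans (List.length_filter_le _ _) (by simp)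

def fv_vecs_alt (people : List (String × List (String × Int))) (entitlements : List String) (contributes_to_entitlement : List (String × Int)) : List (List Int × List Int) :=
  let pd := PySem.Dict.ofList people
  let cd := PySem.Dict.ofList contributes_to_entitlement
  let e0 := (PySem.List.pyGet? entitlements 0).getD ""
  let feat_list := (PySem.Dict.mk (pd.getD e0 [])).keys
  pvGo (fun id => feat_list.map (fun feat => (PySem.Dict.mk (pd.getD id [])).getD feat 0))
       (fun id => cd.getD id 0) pd.keys

-- ===== PRECONDITION & SPEC =====
-- Pre_ excludes exactly the inputs where the Python A raises: an empty entitlements list or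
-- entitlements[0] not a key of people (KeyError/IndexError), a person missing one of the
-- features of people[entitlements[0]] (KeyError), or a person missing from
-- contributes_to_entitlement (KeyError).
def Pre_fv_vecs (people : List (String × List (String × Int))) (entitlements : List String) (contributes_to_entitlement : List (String × Int)) : Prop :=
  entitlements ≠ [] ∧
  (PySem.Dict.ofList people).contains (entitlements.headD "") = true ∧
      ∀ id ∈ (PySem.Dict.ofList people).keys,
        (PySem.Dict.ofList contributes_to_entitlement).contains id = true ∧
        ∀ feat ∈ (PySem.Dict.mk ((PySem.Dict.ofList people).getD (entitlements.headD "") [])).keys,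
          (PySem.Dict.mk ((PySem.Dict.ofList people).getD id [])).contains feat = true
instance (people : List (String × List (String × Int))) (entitlements : List String) (contributes_to_entitlement : List (String × Int)) : Decidable (Pre_fv_vecs people entitlements contributes_to_entitlement) := by unfold Pre_fv_vecs; infer_instance

def pvWitness_fv_vecs : (List (String × List (String × Int))) × List String × (List (String × Int)) :=
  ([("a", [("f", 1), ("g", 2)]), ("b", [("f", 1), ("g", 2)]), ("c", [("f", 0), ("g", 2)])],
   ["a"],
   [("a", 3), ("b", 4), ("c", 5)])

def Spec_fv_vecs (people : List (String × List (String × Int))) (entitlements : List String) (contributes_to_entitlement : List (String × Int)) (out : List (List Int × List Int)) : Prop := out = fv_vecs_alt people entitlements contributes_to_entitlement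
instance (people : List (String × List (String × Int))) (entitlements : List String) (contributes_to_entitlement : List (String × Int)) (out : List (List Int × List Int)) : Decidable (Spec_fv_vecs people entitlements contributes_to_entitlement out) := by unfold Spec_fv_vecs; infer_instance

-- ===== CLAIM (what is proved, stated in full; the proofs are below) =====
def Claim_equal_fv_vecs : Prop := ∀ (people : List (String × List (String × Int))) (entitlements : List String) (contributes_to_entitlement : List (String × Int)), Dom_fv_vecs people entitlements contributes_to_entitlement → Pre_fv_vecs people entitlements contributes_to_entitlement → Spec_fv_vecs people entitlements contributes_to_entitlement (fv_vecs people entitlements contributes_to_entitlement)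

-- ===== LEMMAS AND PROOFS =====

-- A's "if fv in dict: append else insert" branch is exactly Dict.modify with default [].
lemma step_eq_modify (d : PySem.Dict (List Int) (List Int)) (k : List Int) (v : Int) :
    (if d.contains k then d.modify k [] (· ++ [v]) else d.insert k [v]) = d.modify k [] (· ++ [v]) := by
  by_cases h : d.contains k = true
  · simp [h]
  · simp only [Bool.not_eq_true] at h
    simp [h, PySem.Dict.modify, PySem.Dict.getD_of_not_contains d [] h]

-- A's grouping fold, characterised as a map over the ordered-deduped feature vectors.
lemma group_eq (ids : List String) (fv : String → List Int) (c : String → Int) :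
    (ids.foldl (fun d id =>
        if d.contains (fv id) then d.modify (fv id) [] (· ++ [c id])
        else d.insert (fv id) [c id]) PySem.Dict.empty).items
    = (PySem.List.dedup (ids.map fv)).map
        (fun k => (k, (ids.filter (fun i => fv i == k)).map c)) := by
  have h1 : (ids.foldl (fun d id =>
        if d.contains (fv id) then d.modify (fv id) [] (· ++ [c id])
        else d.insert (fv id) [c id]) PySem.Dict.empty)
      = (ids.map (fun id => (fv id, c id))).foldl
          (fun d p => d.modify p.1 [] (· ++ [p.2])) PySem.Dict.empty := by
    rw [List.foldl_map]
    exact PySem.List.foldl_congr_mem ids _ _ _ (fun acc x _ => step_eq_modify acc (fv x) (c x))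
  rw [h1]
  set l := ids.map (fun id => (fv id, c id)) with hl
  have hnd : ((l.foldl (fun d p => d.modify p.1 [] (· ++ [p.2])) PySem.Dict.empty).keys).Nodup :=
    PySem.Dict.nodup_keys_foldl_modify_key l Prod.fst [] (fun d p => (· ++ [p.2])) PySem.Dict.empty (by simp)
  have hkeys : (l.foldl (fun d p => d.modify p.1 [] (· ++ [p.2])) PySem.Dict.empty).keys
      = PySem.List.dedup (ids.map fv) := by
    rw [PySem.Dict.keys_foldl_modify_key l Prod.fst [] (fun d p => (· ++ [p.2])) PySem.Dict.empty]
    simp [PySem.Set.update, PySem.Set.ofList, PySem.List.dedup, hl, List.map_map,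
      Function.comp_def, PySem.Dict.empty]
  rw [PySem.Dict.items_eq_map_keys _ hnd [], hkeys]
  apply List.map_congr_left
  intro k hk
  congr 1
  rw [PySem.Dict.getD_foldl_modify_append]
  simp [hl, List.filter_map, List.map_map, Function.comp_def, PySem.Dict.getD_empty]

-- Set.add grows the set, preserving membership.
lemma mem_add_of_mem {α : Type} [BEq α] (s : PySem.Set α) (y x : α) (h : x ∈ s) : x ∈ PySem.Set.add s y := by
  simp [PySem.Set.add]
  split_ifs <;> simp [h]

-- folding Set.add over elements all distinct from the head x commutes with consing x.
lemma foldl_add_cons {α : Type} [BEq α] [LawfulBEq α] :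
    ∀ (l : List α) (s : List α) (x : α), (∀ y ∈ l, (y == x) = false) →
    List.foldl PySem.Set.add (x :: s) l = x :: List.foldl PySem.Set.add s l := by
  intro l
  induction l with
  | nil => intro s x _; rfl
  | cons y t ih =>
    intro s x h
    have hy : (y == x) = false := h y (by simp)
    have : PySem.Set.add (x :: s) y = x :: PySem.Set.add s y := by
      simp [PySem.Set.add, PySem.Set.contains, hy]
      split_ifs <;> simp
    simp only [List.foldl_cons, this]
    exact ih _ x (fun z hz => h z (by simp [hz]))

-- elements already in the set are skipped by the Set.add fold.
lemma foldl_add_filter {α : Type} [BEq α] [LawfulBEq α] :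
    ∀ (l : List α) (s : List α) (x : α), x ∈ s →
    List.foldl PySem.Set.add s l = List.foldl PySem.Set.add s (l.filter (fun y => !(y == x))) := by
  intro l
  induction l with
  | nil => intro s x _; rfl
  | cons y t ih =>
    intro s x hx
    by_cases hy : (y == x) = true
    · have : y = x := by simpa using hy
      subst this
      have : PySem.Set.add s y = s := by simp [PySem.Set.add, PySem.Set.contains, hx]
      simp only [List.foldl_cons, this, List.filter_cons]
      simp only [hy, Bool.not_true]
      exact ih s y hx
    · simp only [Bool.not_eq_true] at hy
      simp only [List.foldl_cons, List.filter_cons, hy, Bool.not_false]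
      exact ih _ x (mem_add_of_mem s y x hx)

-- dedup keeps the head and dedups the tail with the head's duplicates removed.
lemma dedup_cons_filter {α : Type} [BEq α] [LawfulBEq α] (x : α) (l : List α) :
    PySem.List.dedup (x :: l) = x :: PySem.List.dedup (l.filter (fun y => !(y == x))) := by
  have hof : ∀ m : List α, PySem.List.dedup m = List.foldl PySem.Set.add [] m := by
    intro m; simp [PySem.List.dedup, PySem.Set.ofList_eq_foldl]
  rw [hof, hof]
  have h0 : List.foldl PySem.Set.add [] (x :: l) = List.foldl PySem.Set.add [x] l := by
    simp [PySem.Set.add, PySem.Set.contains]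
  rw [h0, foldl_add_filter l [x] x (by simp)]
  exact foldl_add_cons _ [] x (by
    intro y hy
    have := List.of_mem_filter hy
    simpa using this)

-- B's group-extraction recursion equals the dedup/filter characterisation of A.
lemma pvGo_eq (fvOf : String → List Int) (c : String → Int) :
    ∀ (n : Nat) (ids : List String), ids.length ≤ n →
    pvGo fvOf c ids
      = (PySem.List.dedup (ids.map fvOf)).map
          (fun k => (k, (ids.filter (fun i => fvOf i == k)).map c)) := by
  intro n
  induction n with
  | zero =>
    intro ids h
    have : ids = [] := List.length_eq_zero_iff.mp (Nat.le_zero.mp h)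
    subst this; simp [pvGo, PySem.List.dedup, PySem.Set.ofList]
  | succ m ih =>
    intro ids h
    match ids with
    | [] => simp [pvGo, PySem.List.dedup, PySem.Set.ofList]
    | id :: rest =>
      rw [pvGo]
      have hlen : (rest.filter (fun i => !(fvOf i == fvOf id))).length ≤ m := by
        have := List.length_filter_le (fun i => !(fvOf i == fvOf id)) rest
        simp only [List.length_cons, Nat.succ_le_succ_iff] at h
        omega
      rw [ih _ hlen]
      have hmap : (rest.map fvOf).filter (fun y => !(y == fvOf id))
          = (rest.filter (fun i => !(fvOf i == fvOf id))).map fvOf := by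
        rw [List.filter_map]; rfl
      rw [List.map_cons, dedup_cons_filter, hmap, List.map_cons]
      congr 1
      apply List.map_congr_left
      intro k hk
      have hkmem : k ∈ (rest.filter (fun i => !(fvOf i == fvOf id))).map fvOf :=
        (PySem.List.mem_dedup _ _).mp hk
      have hkne : (k == fvOf id) = false := by
        rcases List.mem_map.mp hkmem with ⟨i, hi, rfl⟩
        have := List.of_mem_filter hi
        simpa using this
      congr 1
      have hhead : (id :: rest).filter (fun i => fvOf i == k)
          = rest.filter (fun i => fvOf i == k) := by
        rw [List.filter_cons]
        have : (fvOf id == k) = false := by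
          cases hek : (fvOf id == k)
          · rfl
          · exact absurd (by simpa using (beq_iff_eq.mp hek).symm) (by simpa using hkne)
        simp [this]
      rw [hhead, List.filter_filter]
      congr 1
      apply List.filter_congr
      intro i _
      cases hik : (fvOf i == k)
      · simp
      · have : fvOf i = k := by simpa using hik
        simp [this, hkne]

-- ===== VERDICT (by name: the statement is the Claim_ definition above) =====
theorem fv_vecs_spec : Claim_equal_fv_vecs := by
  intro people entitlements contributes _ _
  unfold Spec_fv_vecs
  simp only [fv_vecs, fv_vecs_alt, PySem.List.foldl_append_singleton_eq_map, List.nil_append]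
  rw [group_eq, pvGo_eq _ _ (PySem.Dict.ofList people).keys.length _ (le_refl _)]
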